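-- pv_equiv track=rewrite | github.com/berketez/black-widow | karadul/reconstruction/recovery_layers/signature_fusion.py | _to_function_name
-- ===== SOURCE A (Python) =====
-- def _to_function_name(raw: str) -> str:
--     """Ham ismi C fonksiyon adi formatina cevir.
--
--     Ornek: "Quicksort with Lomuto" -> "quicksort_with_lomuto"
--     Ornek: "AES-128 Round" -> "aes_128_round"
--
--     Args:
--         raw: Ham isim.
--
--     Returns:
--         str: C-uyumlu fonksiyon adi.
--     """
--     if not raw:
--         return ""
--     # Kucuk harf, ozel karakterleri kaldir
--     result = raw.strip().lower()
--     result = result.replace("-", "_").replace(" ", "_").replace(".", "_")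
--     # Ardisik underscore'lari tek yap
--     while "__" in result:
--         result = result.replace("__", "_")
--     # Bas/son underscore'lari kaldir
--     result = result.strip("_")
--     return result
-- ===== SOURCE B (Python) =====
-- def _to_function_name(raw: str) -> str:
--     """Single-pass rewrite: map separators to '_', collapse/trim underscores while building."""
--     if not raw:
--         return ""
--     out = []
--     for ch in raw.strip().lower():
--         c = '_' if ch in ('-', ' ', '.') else ch
--         if c == '_' and (not out or out[-1] == '_'):
--             continue
--         out.append(c)
--     if out and out[-1] == '_':
--         out.pop()
--     return ''.join(out)
-- ===== Notes on version B (the rewrite author's own statement) =====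
-- stated objective: alternative
-- what changed: B builds the identifier in a single character pass that maps separators to underscore and collapses runs and trims ends while appending, replacing A's three replace passes, its repeated double-underscore replace loop and its final strip.
import Mathlib
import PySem

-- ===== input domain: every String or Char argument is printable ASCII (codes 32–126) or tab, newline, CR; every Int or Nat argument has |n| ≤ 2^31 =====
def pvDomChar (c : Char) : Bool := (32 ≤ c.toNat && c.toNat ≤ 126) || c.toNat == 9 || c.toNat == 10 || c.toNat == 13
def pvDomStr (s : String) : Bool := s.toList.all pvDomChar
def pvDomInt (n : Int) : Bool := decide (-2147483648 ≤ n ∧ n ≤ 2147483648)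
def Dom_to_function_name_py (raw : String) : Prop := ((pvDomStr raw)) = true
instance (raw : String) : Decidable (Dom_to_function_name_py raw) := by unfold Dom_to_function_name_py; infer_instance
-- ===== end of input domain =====

-- B rebuilds the name in one pass over the characters instead of A's repeated replace/collapse/strip passes; return-value equivalence, no mutation involved.

-- ===== PORT A =====
-- Helpers needed by the port's termination argument: the while loop
-- `while "__" in result: result = result.replace("__", "_")` terminates because
-- each replace strictly shortens the string; `rep` is one replace pass.
def rep : List Char → List Char
  | [] => []
  | [c] => [c]
  | a :: b :: r => if a = '_' ∧ b = '_' then '_' :: rep r else a :: rep (b :: r)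

def db : List Char → Bool
  | [] => false
  | [_] => false
  | a :: b :: r => if a = '_' ∧ b = '_' then true else db (b :: r)

theorem go_dd (fuel : Nat) : ∀ (l acc : List Char), l.length ≤ fuel →
    PySem.Chars.replace.go ['_','_'] ['_'] fuel l acc = acc.reverse ++ rep l := by
  induction fuel with
  | zero =>
    intro l acc h
    interval_cases hl : l.length
    · rw [List.length_eq_zero_iff] at hl; subst hl
      rw [PySem.Chars.replace.go]; simp [rep]
  | succ n ih =>
    intro l acc h
    match l with
    | [] =>
      rw [PySem.Chars.replace.go]
      simp [rep]
      omega
    | [c] =>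
      rw [PySem.Chars.replace.go]
      have hp : (['_','_'].isPrefixOf ([c] : List Char)) = false := by
        simp [List.isPrefixOf]
      rw [hp]
      simp only [Bool.false_eq_true, if_false]
      have := ih [] (c :: acc) (by simp)
      simpa [rep] using this
    | a :: b :: r =>
      rw [PySem.Chars.replace.go]
      by_cases hab : a = '_' ∧ b = '_'
      · obtain ⟨ha, hb⟩ := hab; subst ha; subst hb
        have hp : (['_','_'].isPrefixOf ('_' :: '_' :: r)) = true := by
          simp [List.isPrefixOf]
        rw [hp]
        simp only [if_true]
        have := ih r ('_' :: acc) (by simp at h ⊢; omega)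
        simpa [rep] using this
      · have hp : (['_','_'].isPrefixOf (a :: b :: r)) = false := by
          simp only [List.isPrefixOf, List.isPrefixOf_cons₂ ] at *
          by_cases ha : a = '_'
          · subst ha
            have hb : b ≠ '_' := fun hb => hab ⟨rfl, hb⟩
            simp [List.isPrefixOf, hb, Ne.symm hb]
          · simp [Ne.symm ha]
        rw [hp]
        simp only [Bool.false_eq_true, if_false]
        have := ih (b :: r) (a :: acc) (by simp at h ⊢; omega)
        rw [this]
        simp [rep, hab]

theorem replace_dd (cs : List Char) :
    PySem.Chars.replace cs ['_','_'] ['_'] = rep cs := by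
  rw [PySem.Chars.replace]
  simp only [List.isEmpty_cons, Bool.false_eq_true, if_false]
  exact go_dd cs.length cs [] le_rfl

theorem rep_length_le (cs : List Char) : (rep cs).length ≤ cs.length := by
  fun_induction rep <;> simp_all <;> omega

theorem rep_length_lt : ∀ (cs : List Char), db cs = true → (rep cs).length < cs.length
  | [], h => by simp [db] at h
  | [c], h => by simp [db] at h
  | a :: b :: r, h => by
    by_cases hab : a = '_' ∧ b = '_'
    · have := rep_length_le r
      simp [rep, hab]; omega
    · have e : db (a :: b :: r) = if a = '_' ∧ b = '_' then true else db (b :: r) := rfl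
      rw [e] at h
      simp only [hab, if_false] at h
      have := rep_length_lt (b :: r) h
      simp only [List.length_cons] at this
      simp [rep, hab]
      omega

theorem db_cons (x : Char) (v : List Char) (h : db v = true) : db (x :: v) = true := by
  cases v with
  | nil => simp [db] at h
  | cons b r =>
    have e : db (x :: b :: r) = if x = '_' ∧ b = '_' then true else db (b :: r) := rfl
    rw [e]
    split_ifs <;> simp [h]

theorem db_of_infix (cs : List Char) (h : ['_','_'] <:+: cs) : db cs = true := by
  obtain ⟨s, t, hst⟩ := h
  subst hst
  induction s with
  | nil =>
    rw [List.nil_append]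
    have e : db ('_' :: '_' :: t) = if ('_':Char) = '_' ∧ ('_':Char) = '_' then true else db ('_' :: t) := rfl
    rw [List.cons_append]
    simp [e]
  | cons x s ih =>
    exact db_cons x _ ih

-- The while loop of A: repeat  result = result.replace("__", "_")  while "__" in result.
def collapse (cs : List Char) : List Char :=
  if h : PySem.Chars.isIn ['_','_'] cs = true then
    collapse (PySem.Chars.replace cs ['_','_'] ['_'])
  else cs
termination_by cs.length
decreasing_by
  rw [replace_dd]
  exact rep_length_lt cs (db_of_infix cs ((PySem.Chars.isIn_iff_infix _ _).mp h))

def to_function_name_py (raw : String) : String :=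
  if raw = "" then ""
  else
    let r1 := PySem.Chars.lower (PySem.Chars.strip raw.toList)
    let r2 := PySem.Chars.replace (PySem.Chars.replace (PySem.Chars.replace r1 ['-'] ['_']) [' '] ['_']) ['.'] ['_']
    let r3 := collapse r2
    String.mk (PySem.Chars.stripChars r3 ['_'])

-- ===== PORT B =====
def toU (c : Char) : Char := if c = '-' ∨ c = ' ' ∨ c = '.' then '_' else c

def to_function_name_py_alt (raw : String) : String :=
  if raw = "" then ""
  else
    let s := PySem.Chars.lower (PySem.Chars.strip raw.toList)
    let out := s.foldl (fun out ch =>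
      let c := toU ch
      if c = '_' ∧ (out = [] ∨ out.getLast? = some '_') then out else out ++ [c]) []
    let out2 := if out ≠ [] ∧ out.getLast? = some '_' then out.dropLast else out
    String.mk out2

-- ===== PRECONDITION & SPEC =====
def Spec_to_function_name_py (raw : String) (out : String) : Prop := out = to_function_name_py_alt raw
instance (raw : String) (out : String) : Decidable (Spec_to_function_name_py raw out) := by unfold Spec_to_function_name_py; infer_instance

-- ===== CLAIM (what is proved, stated in full; the proofs are below) =====
def Claim_equal_to_function_name_py : Prop := ∀ (raw : String), Dom_to_function_name_py raw → Spec_to_function_name_py raw (to_function_name_py raw)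

-- ===== LEMMAS AND PROOFS =====

-- the collapse state machine: sqz b cs squeezes runs of '_' (b = last emitted char was '_')
def sqz : Bool → List Char → List Char
  | _, [] => []
  | b, c :: r => if c = '_' then (if b then sqz true r else '_' :: sqz true r) else c :: sqz false r

-- the one-pass machine: state 0 = nothing emitted, 1 = last emitted is not '_', 2 = '_' pending
def gom : Nat → List Char → List Char
  | _, [] => []
  | s, c :: r =>
    if c = '_' then (if s = 1 then gom 2 r else gom s r)
    else (if s = 2 then '_' :: c :: gom 1 r else c :: gom 1 r)

def pU : Char → Bool := fun c => (['_'] : List Char).contains c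

def rstripU (l : List Char) : List Char := (List.dropWhile pU l.reverse).reverse

theorem pU_eq (c : Char) : pU c = decide (c = '_') := by
  by_cases h : c = '_' <;> simp [pU, h]

theorem sq_rep : ∀ (b : Bool) (u : List Char), sqz b (rep u) = sqz b u
  | _, [] => rfl
  | _, [_] => rfl
  | b, a :: c :: r => by
    by_cases hac : a = '_' ∧ c = '_'
    · obtain ⟨ha, hc⟩ := hac
      subst ha; subst hc
      have e : rep ('_' :: '_' :: r) = '_' :: rep r := by simp [rep]
      have h1 : sqz true ('_' :: r) = sqz true r := by simp [sqz]
      rw [e]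
      cases b <;> simp [sqz, h1, sq_rep true r]
    · have e : rep (a :: c :: r) = a :: rep (c :: r) := by simp [rep, hac]
      rw [e]
      by_cases ha : a = '_'
      · cases b <;> simp [sqz, ha, sq_rep true (c :: r)]
      · cases b <;> simp [sqz, ha, sq_rep false (c :: r)]

theorem sq_id : ∀ (u : List Char), db u = false → sqz false u = u
  | [], _ => rfl
  | [c], _ => by by_cases h : c = '_' <;> simp [sqz, h]
  | a :: c :: r, h => by
    have e : db (a :: c :: r) = if a = '_' ∧ c = '_' then true else db (c :: r) := rfl
    rw [e] at h
    by_cases hac : a = '_' ∧ c = '_'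
    · simp [hac] at h
    · simp only [hac, if_false] at h
      have ih := sq_id (c :: r) h
      by_cases ha : a = '_'
      · have hc : c ≠ '_' := fun hc => hac ⟨ha, hc⟩
        have e2 : sqz false (c :: r) = c :: sqz false r := by simp [sqz, hc]
        rw [e2] at ih
        have hr : sqz false r = r := by simpa using ih
        simp [sqz, ha, hc, hr]
      · have e2 : sqz false (a :: c :: r) = a :: sqz false (c :: r) := by simp [sqz, ha]
        rw [e2, ih]

theorem db_imp_infix : ∀ (cs : List Char), db cs = true → ['_','_'] <:+: cs
  | [], h => by rw [show db [] = false from rfl] at h; simp at h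
  | [c], h => by rw [show db [c] = false from rfl] at h; simp at h
  | a :: c :: r, h => by
    have e : db (a :: c :: r) = if a = '_' ∧ c = '_' then true else db (c :: r) := rfl
    rw [e] at h
    by_cases hac : a = '_' ∧ c = '_'
    · obtain ⟨ha, hc⟩ := hac
      subst ha; subst hc
      exact ⟨[], r, rfl⟩
    · simp only [hac, if_false] at h
      exact (List.infix_cons_iff).mpr (Or.inr (db_imp_infix (c :: r) h))

theorem collapse_eq_sq (u : List Char) : collapse u = sqz false u := by
  fun_induction collapse with
  | case1 cs h ih =>
    rw [ih, replace_dd, sq_rep]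
  | case2 cs h =>
    have hdb : db cs = false := by
      by_contra hdb
      have := db_imp_infix cs (by simpa using hdb)
      exact h ((PySem.Chars.isIn_iff_infix _ _).mpr this)
    exact (sq_id cs hdb).symm

theorem dropWhile_sq_true : ∀ (u : List Char), List.dropWhile pU (sqz true u) = sqz true u
  | [] => rfl
  | c :: r => by
    by_cases hc : c = '_'
    · subst hc
      have e : sqz true ('_' :: r) = sqz true r := by simp [sqz]
      rw [e]
      exact dropWhile_sq_true r
    · have e : sqz true (c :: r) = c :: sqz false r := by simp [sqz, hc]
      rw [e, List.dropWhile_cons]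
      simp [pU_eq, hc]

theorem dropWhile_sq_false (u : List Char) : List.dropWhile pU (sqz false u) = sqz true u := by
  cases u with
  | nil => rfl
  | cons c r =>
    by_cases hc : c = '_'
    · subst hc
      have e : sqz false ('_' :: r) = '_' :: sqz true r := by simp [sqz]
      have e2 : sqz true ('_' :: r) = sqz true r := by simp [sqz]
      rw [e, e2, List.dropWhile_cons]
      simp [pU_eq, dropWhile_sq_true r]
    · have e : sqz false (c :: r) = c :: sqz false r := by simp [sqz, hc]
      have e2 : sqz true (c :: r) = c :: sqz false r := by simp [sqz, hc]
      rw [e, e2, List.dropWhile_cons]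
      simp [pU_eq, hc]

theorem rstrip_cons (x : Char) (l : List Char) :
    rstripU (x :: l) = if rstripU l = [] then (if pU x then [] else [x]) else x :: rstripU l := by
  have hiff : rstripU l = [] ↔ List.dropWhile pU l.reverse = [] := by
    simp [rstripU]
  by_cases h : List.dropWhile pU l.reverse = []
  · rw [if_pos (hiff.mpr h)]
    by_cases hx : pU x = true <;>
      simp [rstripU, List.reverse_cons, List.dropWhile_append, h, hx]
  · rw [if_neg (fun hh => h (hiff.mp hh))]
    simp [rstripU, List.reverse_cons, List.dropWhile_append, h]

theorem master : ∀ (u : List Char),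
    rstripU (sqz true u) = gom 0 u ∧ rstripU (sqz false u) = gom 1 u ∧
      gom 2 u = (if gom 0 u = [] then [] else '_' :: gom 0 u)
  | [] => ⟨rfl, rfl, rfl⟩
  | c :: r => by
    obtain ⟨ih0, ih1, ih2⟩ := master r
    by_cases hc : c = '_'
    · subst hc
      refine ⟨?_, ?_, ?_⟩
      · have e1 : sqz true ('_' :: r) = sqz true r := by simp [sqz]
        have e2 : gom 0 ('_' :: r) = gom 0 r := by simp [gom]
        rw [e1, e2]; exact ih0
      · have e1 : sqz false ('_' :: r) = '_' :: sqz true r := by simp [sqz]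
        have e2 : gom 1 ('_' :: r) = gom 2 r := by simp [gom]
        rw [e1, e2, rstrip_cons, ih0, ih2]
        simp [pU_eq]
      · have e2 : gom 2 ('_' :: r) = gom 2 r := by simp [gom]
        have e0 : gom 0 ('_' :: r) = gom 0 r := by simp [gom]
        rw [e2, e0]; exact ih2
    · have est : sqz true (c :: r) = c :: sqz false r := by simp [sqz, hc]
      have esf : sqz false (c :: r) = c :: sqz false r := by simp [sqz, hc]
      have eg0 : gom 0 (c :: r) = c :: gom 1 r := by simp [gom, hc]
      have eg1 : gom 1 (c :: r) = c :: gom 1 r := by simp [gom, hc]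
      have eg2 : gom 2 (c :: r) = '_' :: c :: gom 1 r := by simp [gom, hc]
      have hpc : pU c = false := by simp [pU_eq, hc]
      have key : rstripU (c :: sqz false r) = c :: gom 1 r := by
        rw [rstrip_cons, ih1, hpc]
        by_cases hg : gom 1 r = [] <;> simp [hg]
      refine ⟨by rw [est, eg0]; exact key, by rw [esf, eg1]; exact key, ?_⟩
      rw [eg2, eg0]
      simp

-- B's fold, on the already-mapped character list
def step' (v : List Char) (c : Char) : List Char :=
  if c = '_' ∧ (v = [] ∨ v.getLast? = some '_') then v else v ++ [c]

def dropTr (v : List Char) : List Char :=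
  if v ≠ [] ∧ v.getLast? = some '_' then v.dropLast else v

theorem foldG : ∀ (v : List Char) (w : List Char), w ≠ [] → w.getLast? ≠ some '_' →
    dropTr (List.foldl step' w v) = w ++ gom 1 v ∧
      dropTr (List.foldl step' (w ++ ['_']) v) = w ++ gom 2 v
  | [], w, hw, hl => by
    constructor
    · simp [dropTr, hl, gom]
    · have h1 : (w ++ ['_']).getLast? = some '_' := by simp
      simp [dropTr, h1, gom]
  | c :: r, w, hw, hl => by
    by_cases hc : c = '_'
    · subst hc
      have e1 : step' w '_' = w ++ ['_'] := by
        simp [step', hw, hl]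
      have e2 : step' (w ++ ['_']) '_' = w ++ ['_'] := by
        simp [step']
      have ih2 := (foldG r w hw hl).2
      constructor
      · rw [List.foldl_cons, e1, ih2]
        simp [gom]
      · rw [List.foldl_cons, e2, ih2]
        simp [gom]
    · have e1 : step' w c = w ++ [c] := by simp [step', hc]
      have e2 : step' (w ++ ['_']) c = w ++ ['_'] ++ [c] := by simp [step', hc]
      constructor
      · rw [List.foldl_cons, e1]
        have := (foldG r (w ++ [c]) (by simp) (by simp [hc])).1
        rw [this]
        simp [gom, hc]
      · rw [List.foldl_cons, e2]
        have := (foldG r (w ++ ['_'] ++ [c]) (by simp) (by simp [hc])).1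
        rw [this]
        simp [gom, hc]

theorem foldZ : ∀ (v : List Char), dropTr (List.foldl step' [] v) = gom 0 v
  | [] => by simp [dropTr, gom]
  | c :: r => by
    by_cases hc : c = '_'
    · subst hc
      have e : step' [] '_' = [] := by simp [step']
      rw [List.foldl_cons, e, foldZ r]
      simp [gom]
    · have e : step' [] c = [c] := by simp [step', hc]
      rw [List.foldl_cons, e]
      have := (foldG r [c] (by simp) (by simp [hc])).1
      rw [this]
      simp [gom, hc]

theorem go_one (a b : Char) (fuel : Nat) : ∀ (l acc : List Char), l.length ≤ fuel →
    PySem.Chars.replace.go [a] [b] fuel l acc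
      = acc.reverse ++ l.map (fun c => if c = a then b else c) := by
  induction fuel with
  | zero =>
    intro l acc h
    interval_cases hl : l.length
    · rw [List.length_eq_zero_iff] at hl; subst hl
      rw [PySem.Chars.replace.go]; simp
  | succ n ih =>
    intro l acc h
    match l with
    | [] =>
      rw [PySem.Chars.replace.go]
      simp
      omega
    | c :: t =>
      rw [PySem.Chars.replace.go]
      by_cases hca : c = a
      · subst hca
        have hp : ([c].isPrefixOf (c :: t)) = true := by simp [List.isPrefixOf]
        rw [hp]
        simp only [if_true]
        have := ih t (b :: acc) (by simp at h ⊢; omega)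
        simpa using this
      · have hp : ([a].isPrefixOf (c :: t)) = false := by
          simp [List.isPrefixOf, Ne.symm hca]
        rw [hp]
        simp only [Bool.false_eq_true, if_false]
        have := ih t (c :: acc) (by simp at h ⊢; omega)
        rw [this]
        simp [hca]

theorem replace_one (a b : Char) (cs : List Char) :
    PySem.Chars.replace cs [a] [b] = cs.map (fun c => if c = a then b else c) := by
  rw [PySem.Chars.replace]
  simp only [List.isEmpty_cons, Bool.false_eq_true, if_false]
  exact go_one a b cs.length cs [] le_rfl

theorem map_toU (l : List Char) :
    ((l.map (fun c => if c = '-' then '_' else c)).map (fun c => if c = ' ' then '_' else c)).map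
      (fun c => if c = '.' then '_' else c) = l.map toU := by
  rw [List.map_map, List.map_map]
  refine List.map_congr_left (fun c _ => ?_)
  simp only [Function.comp_apply]
  by_cases h1 : c = '-'
  · subst h1; rfl
  · by_cases h2 : c = ' '
    · subst h2; rfl
    · by_cases h3 : c = '.'
      · subst h3; rfl
      · simp [toU, h1, h2, h3]

theorem stripChars_eq (l : List Char) :
    PySem.Chars.stripChars l ['_'] = rstripU (List.dropWhile pU l) := rfl

-- ===== VERDICT (by name: the statement is the Claim_ definition above) =====
theorem to_function_name_py_spec : Claim_equal_to_function_name_py := by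
  intro raw _
  unfold Spec_to_function_name_py to_function_name_py to_function_name_py_alt
  by_cases hr : raw = ""
  · simp [hr]
  · simp only [hr, if_false]
    set s := PySem.Chars.lower (PySem.Chars.strip raw.toList) with hs
    have hA : PySem.Chars.stripChars
        (collapse (PySem.Chars.replace (PySem.Chars.replace (PySem.Chars.replace s ['-'] ['_']) [' '] ['_']) ['.'] ['_'])) ['_']
        = gom 0 (s.map toU) := by
      rw [replace_one, replace_one, replace_one, map_toU, collapse_eq_sq, stripChars_eq,
        dropWhile_sq_false]
      exact (master (s.map toU)).1
    have hB : (if (List.foldl (fun out ch =>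
          let c := toU ch
          if c = '_' ∧ (out = [] ∨ out.getLast? = some '_') then out else out ++ [c]) [] s) ≠ [] ∧
          (List.foldl (fun out ch =>
          let c := toU ch
          if c = '_' ∧ (out = [] ∨ out.getLast? = some '_') then out else out ++ [c]) [] s).getLast? = some '_'
        then (List.foldl (fun out ch =>
          let c := toU ch
          if c = '_' ∧ (out = [] ∨ out.getLast? = some '_') then out else out ++ [c]) [] s).dropLast
        else (List.foldl (fun out ch =>
          let c := toU ch
          if c = '_' ∧ (out = [] ∨ out.getLast? = some '_') then out else out ++ [c]) [] s))
        = gom 0 (s.map toU) := by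
      have h1 : (List.foldl (fun out ch =>
          let c := toU ch
          if c = '_' ∧ (out = [] ∨ out.getLast? = some '_') then out else out ++ [c]) [] s)
          = List.foldl step' [] (s.map toU) := by
        rw [List.foldl_map]
        rfl
      rw [h1]
      exact foldZ (s.map toU)
    rw [hA, ← hB]
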